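-- pv_equiv track=rewrite | github.com/ZahraAbbasiantaeb/Patents | pipelines/pipeline_uspto_v3.py | check_abbrev_mult
-- ===== SOURCE A (Python) =====
-- def check_abbrev_mult(list_3, str_2):
--
--     str_2_tokens = str_2.split(" ")
--     x = len(list_3)
--
--
--     for str_1 in list_3:
--         str_1_tokens = str_1.split(" ")
--
--         if len(str_1_tokens) != len(str_2_tokens):
--             x = x-1
--             continue
--
--         for token_1, token_2 in zip(str_1_tokens, str_2_tokens):
--             res_1 = token_1.find(token_2)
--             res_2 = token_2.find(token_1)
--
--             if not (res_2==0 or res_1==0):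
--                 x = x-1
--                 break
--     if x == 0:
--         return False
--
--     return True
-- ===== SOURCE B (Python) =====
-- def check_abbrev_mult(list_3, str_2):
--     toks_2 = str_2.split(" ")
--     n = len(toks_2)
--     # stage 1: keep only candidates with the right token count, pre-tokenized
--     survivors = [t for t in (s.split(" ") for s in list_3) if len(t) == n]
--     # stage 2: one pass per token position, narrowing the survivor pool column-wise
--     for j in range(n):
--         b = toks_2[j]
--         survivors = [t for t in survivors if t[j].startswith(b) or b.startswith(t[j])]
--     return len(survivors) > 0
-- ===== Notes on version B (the rewrite author's own statement) =====
-- stated objective: alternative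
-- what changed: Replaces A's row-wise countdown (per-string inner loop over token pairs, x decremented and compared to 0 at the end) with a column-wise staged filter: pre-tokenize once, filter by token count, then one narrowing pass per token position over the shrinking survivor pool, returning whether any survivor remains.
import Mathlib
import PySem

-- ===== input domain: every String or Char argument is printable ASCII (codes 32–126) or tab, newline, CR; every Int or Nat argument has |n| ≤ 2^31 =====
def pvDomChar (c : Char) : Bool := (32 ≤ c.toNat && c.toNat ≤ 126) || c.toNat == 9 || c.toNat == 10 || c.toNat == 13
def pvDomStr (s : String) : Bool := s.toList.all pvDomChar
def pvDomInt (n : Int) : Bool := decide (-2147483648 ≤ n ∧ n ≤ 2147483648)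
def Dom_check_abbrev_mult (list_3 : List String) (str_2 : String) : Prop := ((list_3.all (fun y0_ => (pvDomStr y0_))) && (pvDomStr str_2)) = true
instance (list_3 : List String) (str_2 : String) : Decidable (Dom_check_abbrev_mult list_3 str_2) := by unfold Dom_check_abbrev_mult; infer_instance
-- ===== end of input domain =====

-- B replaces A's row-wise countdown accumulator with a column-wise staged filter
-- (pre-tokenize, filter by token count, then narrow the survivor pool once per token
-- position) — objective: alternative decomposition, same cost.


-- shared helper: s.split(" ") — exact via PySem.Chars.splitOn (the sep ≠ "" form of str.split)
def pySplitSpace (s : String) : List (List Char) := PySem.Chars.splitOn s.toList [' ']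

-- ===== PORT A =====
-- inner `for token_1, token_2 in zip(...)` loop: on the first failing token pair it
-- decrements x and breaks; reaching the end leaves x unchanged
def pvInnerA (pairs : List (List Char × List Char)) (x : Int) : Int :=
  match pairs with
  | [] => x
  | (token_1, token_2) :: rest =>
      let res_1 := PySem.Chars.find token_1 token_2
      let res_2 := PySem.Chars.find token_2 token_1
      if ¬ (res_2 = 0 ∨ res_1 = 0) then x - 1 else pvInnerA rest x

def check_abbrev_mult (list_3 : List String) (str_2 : String) : Bool :=
  let str_2_tokens := pySplitSpace str_2
  let x : Int :=
    list_3.foldl (fun x str_1 =>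
      let str_1_tokens := pySplitSpace str_1
      if str_1_tokens.length ≠ str_2_tokens.length then x - 1
      else pvInnerA (str_1_tokens.zip str_2_tokens) x) (list_3.length : Int)
  if x = 0 then false else true

-- ===== PORT B =====
def check_abbrev_mult_alt (list_3 : List String) (str_2 : String) : Bool :=
  let toks_2 := pySplitSpace str_2
  let n := toks_2.length
  -- stage 1: pre-tokenize, keep only candidates with the right token count
  let survivors0 := (list_3.map pySplitSpace).filter (fun t => t.length == n)
  -- stage 2: one narrowing pass per token position (t[j] is always in range: |t| = n)
  let survivors := (List.range n).foldl (fun surv j =>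
      let b := toks_2.getD j []
      surv.filter (fun t =>
        PySem.Chars.startswith (t.getD j []) b || PySem.Chars.startswith b (t.getD j []))) survivors0
  decide (0 < survivors.length)

-- ===== PRECONDITION & SPEC =====
def Spec_check_abbrev_mult (list_3 : List String) (str_2 : String) (out : Bool) : Prop := out = check_abbrev_mult_alt list_3 str_2
instance (list_3 : List String) (str_2 : String) (out : Bool) : Decidable (Spec_check_abbrev_mult list_3 str_2 out) := by unfold Spec_check_abbrev_mult; infer_instance

-- ===== CLAIM (what is proved, stated in full; the proofs are below) =====
def Claim_equal_check_abbrev_mult : Prop := ∀ (list_3 : List String) (str_2 : String), Dom_check_abbrev_mult list_3 str_2 → Spec_check_abbrev_mult list_3 str_2 (check_abbrev_mult list_3 str_2)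

-- ===== LEMMAS AND PROOFS =====

-- proof-side characterisation: a token list matches toks_2
def pvM (toks_2 : List (List Char)) (t : List (List Char)) : Bool :=
  t.length == toks_2.length &&
    (t.zip toks_2).all (fun p => PySem.Chars.startswith p.1 p.2 || PySem.Chars.startswith p.2 p.1)

-- s.find(sub) == 0 is exactly s.startswith(sub)
lemma chars_find_zero_iff (s sub : List Char) : PySem.Chars.find s sub = 0 ↔ sub <+: s := by
  constructor
  · intro h
    have hspec := PySem.Chars.find_spec (s := s) (sub := sub) (by rw [h])
    simpa [h] using hspec.1
  · intro h
    have h0 : 0 ≤ PySem.Chars.find s sub := by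
      rw [PySem.Chars.find_nonneg_iff]
      exact h.isInfix
    have hspec := PySem.Chars.find_spec (s := s) (sub := sub) h0
    by_contra hne
    have hpos : 0 < (PySem.Chars.find s sub).toNat := by omega
    exact hspec.2 0 hpos (by simpa using h)

-- A's inner loop decrements x exactly when some token pair fails the two-way prefix test
lemma pvInnerA_eq (pairs : List (List Char × List Char)) (x : Int) :
    pvInnerA pairs x =
      if pairs.all (fun p => PySem.Chars.startswith p.1 p.2 || PySem.Chars.startswith p.2 p.1)
      then x else x - 1 := by
  induction pairs with
  | nil => simp [pvInnerA]
  | cons p rest ih =>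
    obtain ⟨t1, t2⟩ := p
    have hiff : (PySem.Chars.find t2 t1 = 0 ∨ PySem.Chars.find t1 t2 = 0) ↔
        (PySem.Chars.startswith t1 t2 || PySem.Chars.startswith t2 t1) = true := by
      rw [Bool.or_eq_true, PySem.Chars.startswith_iff, PySem.Chars.startswith_iff,
        chars_find_zero_iff, chars_find_zero_iff]
      tauto
    by_cases hm : (PySem.Chars.startswith t1 t2 || PySem.Chars.startswith t2 t1) = true
    · have hnot : ¬ ¬ (PySem.Chars.find t2 t1 = 0 ∨ PySem.Chars.find t1 t2 = 0) :=
        not_not_intro (hiff.mpr hm)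
      simp only [pvInnerA]
      rw [if_neg hnot, ih, List.all_cons, hm, Bool.true_and]
    · have hyes : ¬ (PySem.Chars.find t2 t1 = 0 ∨ PySem.Chars.find t1 t2 = 0) :=
        fun h => hm (hiff.mp h)
      simp only [pvInnerA]
      rw [if_pos hyes]
      simp only [Bool.not_eq_true] at hm
      simp [hm]

-- each iteration of A's outer loop decrements x exactly when the string does not match
lemma stepA_eq (toks_2 : List (List Char)) (x : Int) (str_1 : String) :
    (let str_1_tokens := pySplitSpace str_1
     if str_1_tokens.length ≠ toks_2.length then x - 1
     else pvInnerA (str_1_tokens.zip toks_2) x) =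
    (if pvM toks_2 (pySplitSpace str_1) then x else x - 1) := by
  simp only [pvM, pvInnerA_eq]
  by_cases hl : (pySplitSpace str_1).length = toks_2.length
  · rw [if_neg (not_not_intro hl)]
    have h2 : ((pySplitSpace str_1).length == toks_2.length) = true := beq_iff_eq.mpr hl
    simp only [h2, Bool.true_and]
  · rw [if_pos hl]
    have h2 : ((pySplitSpace str_1).length == toks_2.length) = false := by simp [hl]
    simp [h2]

-- the countdown fold ends at init minus the number of non-matching strings
lemma foldl_match_count (l : List String) (toks_2 : List (List Char)) (x : Int) :
    l.foldl (fun x s => if pvM toks_2 (pySplitSpace s) then x else x - 1) x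
    = x - ((l.countP (fun s => ! pvM toks_2 (pySplitSpace s)) : Nat) : Int) := by
  induction l generalizing x with
  | nil => simp
  | cons a l ih =>
    simp only [List.foldl_cons, List.countP_cons]
    rw [ih]
    by_cases ha : pvM toks_2 (pySplitSpace a) = true
    · simp [ha]
    · simp only [Bool.not_eq_true] at ha
      simp [ha]
      omega

-- A's fold is pointwise the countdown fold
lemma foldl_count (l : List String) (toks_2 : List (List Char)) (x : Int) :
    l.foldl (fun x str_1 =>
      let str_1_tokens := pySplitSpace str_1
      if str_1_tokens.length ≠ toks_2.length then x - 1
      else pvInnerA (str_1_tokens.zip toks_2) x) x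
    = x - ((l.countP (fun s => ! pvM toks_2 (pySplitSpace s)) : Nat) : Int) := by
  have hfun : (fun (x : Int) (str_1 : String) =>
      let str_1_tokens := pySplitSpace str_1
      if str_1_tokens.length ≠ toks_2.length then x - 1
      else pvInnerA (str_1_tokens.zip toks_2) x)
      = (fun (x : Int) (s : String) => if pvM toks_2 (pySplitSpace s) then x else x - 1) := by
    funext x s
    exact stepA_eq toks_2 x s
  rw [hfun, foldl_match_count]

-- B's iterated per-column filter is one filter by the conjunction over columns
lemma foldl_filter_range {α : Type} (P : Nat → α → Bool) (n : Nat) (l : List α) :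
    (List.range n).foldl (fun s j => s.filter (P j)) l
    = l.filter (fun t => (List.range n).all (fun j => P j t)) := by
  induction n with
  | zero => simp
  | succ n ih =>
    rw [List.range_succ, List.foldl_append, ih, List.foldl_cons, List.foldl_nil,
      List.filter_filter]
    apply List.filter_congr
    intro t _
    simp [Bool.and_comm]

-- for token lists of the right length the column-wise test is the zip test
lemma range_all_eq_zip_all (t u : List (List Char)) (h : t.length = u.length)
    (p : List Char → List Char → Bool) :
    (List.range u.length).all (fun j => p (t.getD j []) (u.getD j []))
    = (t.zip u).all (fun q => p q.1 q.2) := by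
  induction t generalizing u with
  | nil =>
    cases u with
    | nil => simp
    | cons b u => simp at h
  | cons a t ih =>
    cases u with
    | nil => simp at h
    | cons b u =>
      have h' : t.length = u.length := by simpa using h
      simp only [List.length_cons, List.range_succ_eq_map, List.all_cons, List.all_map,
        Function.comp_def, List.getD_cons_succ, List.getD_cons_zero, List.zip_cons_cons]
      rw [ih u h']

-- ===== VERDICT (by name: the statement is the Claim_ definition above) =====
theorem check_abbrev_mult_spec : Claim_equal_check_abbrev_mult := by
  intro list_3 str_2 _
  unfold Spec_check_abbrev_mult check_abbrev_mult check_abbrev_mult_alt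
  simp only [foldl_count]
  set t2 := pySplitSpace str_2 with ht2
  -- B's survivors are exactly the matching token lists
  have hsurv :
      (List.range t2.length).foldl (fun surv j =>
        surv.filter (fun t =>
          PySem.Chars.startswith (t.getD j []) (t2.getD j []) ||
          PySem.Chars.startswith (t2.getD j []) (t.getD j [])))
        ((list_3.map pySplitSpace).filter (fun t => t.length == t2.length))
      = (list_3.map pySplitSpace).filter (pvM t2) := by
    rw [foldl_filter_range]
    rw [List.filter_filter]
    apply List.filter_congr
    intro t _
    unfold pvM
    by_cases hl : t.length = t2.length
    · have hb : (t.length == t2.length) = true := beq_iff_eq.mpr hl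
      rw [hb]
      simp only [Bool.and_true, Bool.true_and]
      exact range_all_eq_zip_all t t2 hl
        (fun x y => PySem.Chars.startswith x y || PySem.Chars.startswith y x)
    · have hb : (t.length == t2.length) = false := by simp [hl]
      simp [hb]
  rw [hsurv]
  -- both sides reduce to "some element of list_3 matches"
  have hany : (0 < ((list_3.map pySplitSpace).filter (pvM t2)).length)
      ↔ list_3.any (fun s => pvM t2 (pySplitSpace s)) = true := by
    rw [List.length_pos_iff]
    constructor
    · intro hne
      obtain ⟨x, hx⟩ := List.exists_mem_of_ne_nil _ hne
      rw [List.mem_filter] at hx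
      rcases List.mem_map.mp hx.1 with ⟨s, hs, rfl⟩
      exact List.any_eq_true.mpr ⟨s, hs, hx.2⟩
    · intro hyes
      rcases List.any_eq_true.mp hyes with ⟨s, hs, hm⟩
      exact List.ne_nil_of_mem (List.mem_filter.mpr ⟨List.mem_map_of_mem hs, hm⟩)
  have hle : list_3.countP (fun s => ! pvM t2 (pySplitSpace s)) ≤ list_3.length :=
    List.countP_le_length
  by_cases h : list_3.any (fun s => pvM t2 (pySplitSpace s)) = true
  · have hlt : list_3.countP (fun s => ! pvM t2 (pySplitSpace s)) < list_3.length := by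
      rcases List.any_eq_true.mp h with ⟨a, ha, hm⟩
      rw [List.countP_eq_length_filter]
      exact List.length_filter_lt_length_iff_exists.mpr ⟨a, ha, by simp [hm]⟩
    have hne : ¬ ((list_3.length : Int) - ((list_3.countP (fun s => ! pvM t2 (pySplitSpace s)) : Nat) : Int) = 0) := by
      omega
    rw [if_neg hne]
    symm
    rw [decide_eq_true_iff]
    exact hany.mpr h
  · have hall : ∀ x ∈ list_3, pvM t2 (pySplitSpace x) = false := by
      intro x hx
      by_contra hc
      exact h (List.any_eq_true.mpr ⟨x, hx, by simpa using hc⟩)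
    have hcnt : list_3.countP (fun s => ! pvM t2 (pySplitSpace s)) = list_3.length := by
      apply List.countP_eq_length.mpr
      intro x hx
      simp [hall x hx]
    rw [hcnt, if_pos (by omega : (list_3.length : Int) - ((list_3.length : Nat) : Int) = 0)]
    symm
    rw [decide_eq_false_iff_not]
    intro hpos
    exact h (hany.mp hpos)
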